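-- pv_equiv track=rewrite | github.com/jkyu/advent | 2023/14/solution.py | compute_load
-- ===== SOURCE A (Python) =====
-- def compute_load(platform):
--     """
--     A rock at the top of the board has load == n_rows.
--     Subtract one from the load for each row away from the top.
--     """
--     n_rows = len(platform)
--     load = 0
--     for row in range(len(platform)):
--         for rock in platform[row]:
--             if rock == "O":
--                 load += n_rows - row
--     return load
-- ===== SOURCE B (Python) =====
-- def compute_load(platform):
--     # One pass top-to-bottom with a running rock count: a rock in row i is
--     # counted once at every row i..n-1, i.e. n-i times, so no per-rock
--     # weight multiplication is needed.
--     count = 0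
--     load = 0
--     for row in platform:
--         count += sum(1 for rock in row if rock == "O")
--         load += count
--     return load
-- ===== Notes on version B (the rewrite author's own statement) =====
-- stated objective: alternative
-- what changed: Replaces the index-based nested loop that adds the weight (n_rows - row) per rock with a single prefix-sum pass: a running count of rocks seen so far is added to the load at each row, so no indices and no per-rock weight arithmetic are needed.
import Mathlib
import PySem

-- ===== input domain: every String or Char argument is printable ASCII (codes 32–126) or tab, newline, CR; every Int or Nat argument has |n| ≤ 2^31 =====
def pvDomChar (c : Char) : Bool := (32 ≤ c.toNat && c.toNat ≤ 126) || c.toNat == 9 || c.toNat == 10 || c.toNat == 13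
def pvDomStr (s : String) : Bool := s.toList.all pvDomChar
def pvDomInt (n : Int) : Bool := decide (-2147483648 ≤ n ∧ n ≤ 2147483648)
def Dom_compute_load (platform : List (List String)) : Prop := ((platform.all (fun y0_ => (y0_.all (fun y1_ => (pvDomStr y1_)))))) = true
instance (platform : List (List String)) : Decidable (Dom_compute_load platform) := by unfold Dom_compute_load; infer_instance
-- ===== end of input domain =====

-- B replaces A's index-based weighted sum with a running-count prefix-sum pass (alternative decomposition, same cost).

-- ===== PORT A =====
def compute_load (platform : List (List String)) : Int :=
  let n_rows : Int := platform.length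
  (PySem.List.enumerate platform).foldl
    (fun load p =>
      p.2.foldl (fun load rock => if rock == "O" then load + (n_rows - p.1) else load) load)
    0

-- ===== PORT B =====
def compute_load_alt (platform : List (List String)) : Int :=
  (platform.foldl
    (fun (st : Int × Int) row =>
      let count := st.1 + ((row.filter (fun rock => rock == "O")).length : Int)
      (count, st.2 + count))
    (0, 0)).2

-- ===== PRECONDITION & SPEC =====
def Spec_compute_load (platform : List (List String)) (out : Int) : Prop := out = compute_load_alt platform
instance (platform : List (List String)) (out : Int) : Decidable (Spec_compute_load platform out) := by unfold Spec_compute_load; infer_instance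

-- ===== CLAIM (what is proved, stated in full; the proofs are below) =====
def Claim_equal_compute_load : Prop := ∀ (platform : List (List String)), Dom_compute_load platform → Spec_compute_load platform (compute_load platform)

-- ===== LEMMAS AND PROOFS =====

-- count of "O" entries in a row, as an Int
def pvRC (row : List String) : Int := ((row.filter (fun rock => rock == "O")).length : Int)

-- the common value: each row weighted by the length of the suffix starting at it
def pvW : List (List String) → Int
  | [] => 0
  | r :: l => ((l.length : Int) + 1) * pvRC r + pvW l

lemma pv_inner (row : List String) : ∀ (load w : Int),
    row.foldl (fun load rock => if rock == "O" then load + w else load) load = load + w * pvRC row := by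
  induction row with
  | nil => intro load w; simp [pvRC]
  | cons r t ih =>
    intro load w
    simp only [List.foldl_cons]
    by_cases h : r == "O"
    · rw [if_pos h, ih]
      simp only [pvRC, List.filter_cons, h, if_pos]
      simp only [List.length_cons]; push_cast; ring
    · rw [if_neg h, ih]
      simp only [pvRC, List.filter_cons, h]
      simp

lemma pv_A_run (n : Int) : ∀ (l : List (List String)) (s load : Int), n - s = l.length →
    (PySem.List.enumerate l s).foldl
      (fun load p =>
        p.2.foldl (fun load rock => if rock == "O" then load + (n - p.1) else load) load)
      load = load + pvW l := by
  intro l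
  induction l with
  | nil => intro s load _; simp [PySem.List.enumerate_nil, pvW]
  | cons r t ih =>
    intro s load h
    rw [PySem.List.enumerate_cons]
    simp only [List.foldl_cons]
    rw [pv_inner, ih (s + 1) _ (by simp only [List.length_cons] at h ⊢; push_cast at h ⊢; omega)]
    have hn : n - s = (t.length : Int) + 1 := by simp only [List.length_cons] at h ⊢; push_cast at h ⊢; omega
    simp only [pvW]
    rw [hn]; ring

lemma pv_B_run : ∀ (l : List (List String)) (c s : Int),
    l.foldl
      (fun (st : Int × Int) row =>
        let count := st.1 + ((row.filter (fun rock => rock == "O")).length : Int)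
        (count, st.2 + count))
      (c, s) = (c + (l.map pvRC).sum, s + (l.length : Int) * c + pvW l) := by
  intro l
  induction l with
  | nil => intro c s; simp [pvW]
  | cons r t ih =>
    intro c s
    simp only [List.foldl_cons, ih, pvW, List.map_cons, List.sum_cons, pvRC]
    rw [Prod.mk.injEq]
    refine ⟨by ring, by simp only [List.length_cons]; push_cast; ring⟩

-- ===== VERDICT (by name: the statement is the Claim_ definition above) =====
theorem compute_load_spec : Claim_equal_compute_load := by
  intro platform _
  unfold Spec_compute_load compute_load compute_load_alt
  rw [pv_A_run (platform.length : Int) platform 0 0 (by simp), pv_B_run]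
  simp
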